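-- pv_equiv track=rewrite | github.com/BUAA-SUT/FAILTIM | code/DM.py | AlgComp
-- ===== SOURCE A (Python) =====
-- def AlgComp(x, n, i):
--     array = []
--     for j in range(n, n*n):
--         if j % n == i:
--             pass
--         else:
--             array.append(x[j])
--     return array
-- ===== SOURCE B (Python) =====
-- def AlgComp(x, n, i):
--     arr = [x[j] for j in range(n, n * n)]
--     if 0 <= i < n:
--         del arr[i::n]
--     return arr
-- ===== Notes on version B (the rewrite author's own statement) =====
-- stated objective: alternative
-- what changed: Replaces A's single pass with a per-element modulo skip test by two staged passes: materialise the whole segment x[n:n*n] with one comprehension, then delete column i with a single strided deletion 'del arr[i::n]' (guarded by 0 <= i < n).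
-- outside the precondition, e.g. on AlgComp([1, 2, 3, 4], -2, -1): A returns [3, 1, 3], B returns [3, 4, 1, 2, 3, 4]
import Mathlib
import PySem

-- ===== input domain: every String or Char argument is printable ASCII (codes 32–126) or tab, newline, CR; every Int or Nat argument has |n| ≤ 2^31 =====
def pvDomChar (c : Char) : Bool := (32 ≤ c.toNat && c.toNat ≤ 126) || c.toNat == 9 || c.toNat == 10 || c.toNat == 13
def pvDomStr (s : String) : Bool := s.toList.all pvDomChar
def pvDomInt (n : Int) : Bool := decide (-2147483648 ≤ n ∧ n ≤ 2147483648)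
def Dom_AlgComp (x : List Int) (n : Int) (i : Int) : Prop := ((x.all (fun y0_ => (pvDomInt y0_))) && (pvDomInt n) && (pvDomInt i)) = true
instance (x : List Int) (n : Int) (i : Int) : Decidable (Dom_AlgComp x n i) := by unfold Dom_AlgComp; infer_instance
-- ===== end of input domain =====

-- B replaces A's element-by-element scan with a modulo skip test by two staged passes:
-- materialise the whole segment x[n:n*n] by one comprehension, then delete column i
-- with a single strided deletion 'del arr[i::n]'. Objective: alternative, not faster.

-- ===== PORT A =====
-- x[j] is PySem.List.pyGetD; the default 0 is never reached on Pre_ (all indices in range).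
def AlgComp (x : List Int) (n : Int) (i : Int) : List Int :=
  (PySem.List.pyRange n (n * n) 1).foldl
    (fun array j =>
      if PySem.Int.mod j n = i then array
      else array ++ [PySem.List.pyGetD x j 0]) []

-- ===== PORT B =====
-- 'del arr[i::n]' has no PySem primitive; under the guard 0 ≤ i < n it removes exactly
-- the elements at positions i, i+n, i+2n, …, ported by hand (exactly) as a positional
-- filter over enumerate(arr).
def AlgComp_alt (x : List Int) (n : Int) (i : Int) : List Int :=
  let arr := (PySem.List.pyRange n (n * n) 1).map (fun j => PySem.List.pyGetD x j 0)
  if 0 ≤ i ∧ i < n then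
    (PySem.List.enumerate arr 0).filterMap
      (fun p => if PySem.Int.mod p.1 n = i then none else some p.2)
  else arr

-- ===== PRECONDITION & SPEC =====
-- Pre_ restricts to the natural domain: nonnegative n (a negative matrix size is meaningless;
-- there A reads through Python's negative-index wraparound or raises IndexError) and, for n ≥ 2,
-- a list long enough that every index j < n*n exists (else A raises IndexError).
def Pre_AlgComp (x : List Int) (n : Int) (i : Int) : Prop :=
  0 ≤ n ∧ (n ≤ 1 ∨ n * n ≤ (x.length : Int))
instance (x : List Int) (n : Int) (i : Int) : Decidable (Pre_AlgComp x n i) := by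
  unfold Pre_AlgComp; infer_instance

def pvWitness_AlgComp : List Int × Int × Int := ([1, 2, 3, 4], 2, 0)

def Spec_AlgComp (x : List Int) (n : Int) (i : Int) (out : List Int) : Prop := out = AlgComp_alt x n i
instance (x : List Int) (n : Int) (i : Int) (out : List Int) : Decidable (Spec_AlgComp x n i out) := by unfold Spec_AlgComp; infer_instance

-- ===== CLAIM =====
def Claim_equal_AlgComp : Prop := ∀ (x : List Int) (n : Int) (i : Int), Dom_AlgComp x n i → Pre_AlgComp x n i → Spec_AlgComp x n i (AlgComp x n i)

-- ===== LEMMAS AND PROOFS =====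

-- a filterMap whose function is 'if p then none else some (g _)' is a filter followed by a map
lemma pvFilterMap_if {α : Type} (l : List α) (p : α → Prop) [DecidablePred p] (g : α → Int) :
    l.filterMap (fun k => if p k then none else some (g k))
      = (l.filter (fun k => decide ¬ p k)).map g := by
  induction l with
  | nil => rfl
  | cons a l ih =>
      by_cases h : p a <;> simp [h, ih]

lemma pvMod_shift (n m : Int) (hn : 0 < n) : PySem.Int.mod (n + m) n = PySem.Int.mod m n := by
  rw [PySem.Int.mod_eq_emod_of_pos hn, PySem.Int.mod_eq_emod_of_pos hn]
  have h := Int.add_mul_emod_self_left m n 1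
  rw [mul_one] at h
  rw [show n + m = m + n from by ring, h]

lemma pvMod_bounds (j n : Int) (hn : 0 < n) :
    0 ≤ PySem.Int.mod j n ∧ PySem.Int.mod j n < n := by
  rw [PySem.Int.mod_eq_emod_of_pos hn]
  exact ⟨Int.emod_nonneg j (ne_of_gt hn), Int.emod_lt_of_pos j hn⟩

-- ===== VERDICT =====
theorem AlgComp_spec : Claim_equal_AlgComp := by
  intro x n i _ hpre
  obtain ⟨hn0, _⟩ := hpre
  unfold Spec_AlgComp AlgComp AlgComp_alt
  -- A's loop is a filter-then-map over its range
  have hfold : ∀ (l : List Int),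
      l.foldl (fun array j => if PySem.Int.mod j n = i then array
                else array ++ [PySem.List.pyGetD x j 0]) []
        = (l.filter (fun j => decide (¬ PySem.Int.mod j n = i))).map
            (fun j => PySem.List.pyGetD x j 0) := by
    intro l
    have h := PySem.List.foldl_append_if (fun j => decide (¬ PySem.Int.mod j n = i))
      (fun j => PySem.List.pyGetD x j 0) l []
    rw [List.nil_append] at h
    rw [← h]
    apply PySem.List.foldl_congr_mem
    intro acc j _
    by_cases hm : PySem.Int.mod j n = i <;> simp [hm]
  simp only [hfold]
  rcases eq_or_lt_of_le hn0 with h0 | hn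
  · -- n = 0 : both sides are built from empty ranges
    rw [← h0]
    have e : PySem.List.pyRange (0:Int) (0 * 0) 1 = [] := by
      rw [show (0:Int) * 0 = 0 from by norm_num]
      exact PySem.List.pyRange_one_eq_nil le_rfl
    rw [e]
    simp [PySem.List.enumerate_eq_map_pyRange ([] : List Int) 0,
          PySem.List.pyRange_one_eq_nil (le_refl (0:Int))]
  · by_cases hi : 0 ≤ i ∧ i < n
    · rw [if_pos hi]
      rw [PySem.List.enumerate_eq_map_pyRange _ 0, List.filterMap_map]
      have hL : PySem.List.len
          ((PySem.List.pyRange n (n * n) 1).map (fun j => PySem.List.pyGetD x j 0))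
            = ((n * n - n).toNat : Int) := by
        simp [PySem.List.len, PySem.List.length_pyRange_one]
      rw [hL]
      rw [show (fun p : Int × Int => if PySem.Int.mod p.1 n = i then none else some p.2) ∘
            (fun j => (j, PySem.List.pyGetD
              ((PySem.List.pyRange n (n * n) 1).map (fun j => PySem.List.pyGetD x j 0)) j 0))
          = fun j => if PySem.Int.mod j n = i then none
              else some (PySem.List.pyGetD
                ((PySem.List.pyRange n (n * n) 1).map (fun j => PySem.List.pyGetD x j 0)) j 0)
          from rfl]
      rw [PySem.List.pyRange_zero_natCast, List.filterMap_map]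
      have hcomp : ((fun j : Int => if PySem.Int.mod j n = i then none
              else some (PySem.List.pyGetD
                ((PySem.List.pyRange n (n * n) 1).map (fun j => PySem.List.pyGetD x j 0)) j 0))
            ∘ (fun k : Nat => (k : Int)))
          = fun k : Nat => if PySem.Int.mod ((k : Int)) n = i then none
              else some (PySem.List.pyGetD
                ((PySem.List.pyRange n (n * n) 1).map (fun j => PySem.List.pyGetD x j 0))
                ((k : Int)) 0) := rfl
      rw [hcomp, pvFilterMap_if]
      rw [PySem.List.pyRange_one n (n * n)]
      rw [List.filter_map, List.map_map]
      have hq : ((fun j => decide (¬ PySem.Int.mod j n = i)) ∘ (fun k : Nat => n + (k:Int)))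
          = fun k : Nat => decide (¬ PySem.Int.mod ((k:Int)) n = i) := by
        funext k
        simp only [Function.comp_apply]
        rw [pvMod_shift n (k:Int) hn]
      rw [hq]
      apply List.map_congr_left
      intro k hk
      have hkN : k < (n * n - n).toNat := by
        have := (List.mem_filter.mp hk).1
        exact List.mem_range.mp this
      simp only [Function.comp_apply]
      rw [List.map_map, PySem.List.pyGetD_natCast,
          PySem.List.getD_map_range _ _ _ _ hkN]
      rfl
    · rw [if_neg hi]
      rw [List.filter_eq_self.mpr (fun j _ => by
        have hb := pvMod_bounds j n hn
        simp only [decide_eq_true_eq]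
        omega)]
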